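-- pv_equiv track=rewrite | github.com/mspercieve/FlashVTG | tools/vis_utils.py | get_chunk_ranges
-- ===== SOURCE A (Python) =====
-- def get_chunk_ranges(total_frames, num_chunks=3):
--     """
--     전체 프레임 수에 맞춰 num_chunks(기본 3)로 등분한 구간 리스트 반환.
--     각 구간은 (start, end) 형태이며, end는 포함.
--     """
--     chunk_size = total_frames // num_chunks
--     ranges = []
--     for i in range(num_chunks):
--         start = i * chunk_size
--         # 마지막 구간은 전체 프레임을 포함하도록 함.
--         end = (total_frames - 1) if i == num_chunks - 1 else (i * chunk_size + chunk_size - 1)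
--         ranges.append((start, end))
--     return ranges
-- ===== SOURCE B (Python) =====
-- def get_chunk_ranges(total_frames, num_chunks=3):
--     # Build the ranges back-to-front: each chunk's end is carried in from the
--     # start of the chunk after it (the last chunk gets total_frames - 1),
--     # so no per-iteration last-chunk conditional is needed.
--     chunk_size = total_frames // num_chunks
--     ranges = []
--     end = total_frames - 1
--     for i in range(num_chunks - 1, -1, -1):
--         start = i * chunk_size
--         ranges.append((start, end))
--         end = start - 1
--     ranges.reverse()
--     return ranges
-- ===== Notes on version B (the rewrite author's own statement) =====
-- stated objective: alternative
-- what changed: B builds the list back-to-front, carrying each chunk's end down from the next chunk's start (the conditional last-chunk special case disappears; the carried accumulator replaces per-index end arithmetic), then reverses.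
import Mathlib
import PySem

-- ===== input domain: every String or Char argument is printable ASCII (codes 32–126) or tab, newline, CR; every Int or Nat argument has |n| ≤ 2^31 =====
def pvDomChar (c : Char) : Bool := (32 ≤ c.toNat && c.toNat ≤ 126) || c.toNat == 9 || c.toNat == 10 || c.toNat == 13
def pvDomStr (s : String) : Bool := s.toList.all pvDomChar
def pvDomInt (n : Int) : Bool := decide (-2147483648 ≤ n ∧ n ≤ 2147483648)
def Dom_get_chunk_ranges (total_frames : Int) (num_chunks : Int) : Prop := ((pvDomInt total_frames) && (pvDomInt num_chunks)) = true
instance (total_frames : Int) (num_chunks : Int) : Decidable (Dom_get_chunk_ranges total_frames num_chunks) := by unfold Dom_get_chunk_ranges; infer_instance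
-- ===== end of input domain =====

-- B builds the ranges back-to-front, carrying each chunk's end down from the next chunk's start,
-- then reverses (alternative decomposition; the last-chunk conditional disappears; same cost).

-- ===== PORT A =====
def get_chunk_ranges (total_frames : Int) (num_chunks : Int) : List (Int × Int) :=
  let chunk_size := PySem.Int.floordiv total_frames num_chunks
  (PySem.List.pyRange 0 num_chunks 1).foldl
    (fun ranges i =>
      ranges ++ [(i * chunk_size,
        if i == num_chunks - 1 then total_frames - 1 else i * chunk_size + chunk_size - 1)])
    []

-- ===== PORT B =====
def get_chunk_ranges_alt (total_frames : Int) (num_chunks : Int) : List (Int × Int) :=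
  let chunk_size := PySem.Int.floordiv total_frames num_chunks
  -- loop state = (ranges, end); for i in range(num_chunks - 1, -1, -1)
  let st := (PySem.List.pyRange (num_chunks - 1) (-1) (-1)).foldl
    (fun (p : List (Int × Int) × Int) i =>
      (p.1 ++ [(i * chunk_size, p.2)], i * chunk_size - 1))
    ([], total_frames - 1)
  st.1.reverse

-- ===== PRECONDITION & SPEC =====
-- Pre_: Python's '//' raises ZeroDivisionError when num_chunks = 0 (in both A and B).
def Pre_get_chunk_ranges (total_frames : Int) (num_chunks : Int) : Prop := num_chunks ≠ 0
instance (total_frames : Int) (num_chunks : Int) : Decidable (Pre_get_chunk_ranges total_frames num_chunks) := by unfold Pre_get_chunk_ranges; infer_instance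
def pvWitness_get_chunk_ranges : Int × Int := (10, 3)

def Spec_get_chunk_ranges (total_frames : Int) (num_chunks : Int) (out : List (Int × Int)) : Prop := out = get_chunk_ranges_alt total_frames num_chunks
instance (total_frames : Int) (num_chunks : Int) (out : List (Int × Int)) : Decidable (Spec_get_chunk_ranges total_frames num_chunks out) := by unfold Spec_get_chunk_ranges; infer_instance

-- ===== CLAIM (what is proved, stated in full; the proofs are below) =====
def Claim_equal_get_chunk_ranges : Prop := ∀ (total_frames : Int) (num_chunks : Int), Dom_get_chunk_ranges total_frames num_chunks → Pre_get_chunk_ranges total_frames num_chunks → Spec_get_chunk_ranges total_frames num_chunks (get_chunk_ranges total_frames num_chunks)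

-- ===== LEMMAS AND PROOFS =====

-- A's append-accumulator loop is a map over the index range.
theorem getA_eq_map (tf nc : Int) :
    get_chunk_ranges tf nc =
      (PySem.List.pyRange 0 nc 1).map
        (fun i => (i * PySem.Int.floordiv tf nc,
          if i == nc - 1 then tf - 1 else i * PySem.Int.floordiv tf nc + PySem.Int.floordiv tf nc - 1)) := by
  show List.foldl _ [] _ = _
  rw [PySem.List.foldl_append_singleton_eq_map]
  simp

-- The recursive shape of B's loop result (first component of the fold state).
def goB (cs : Int) : List Int → Int → List (Int × Int)
  | [], _ => []
  | i :: t, e => (i * cs, e) :: goB cs t (i * cs - 1)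

theorem foldl_goB (cs : Int) (l : List Int) : ∀ (acc : List (Int × Int)) (e : Int),
    ((l.foldl (fun (p : List (Int × Int) × Int) i => (p.1 ++ [(i * cs, p.2)], i * cs - 1)) (acc, e)).1)
      = acc ++ goB cs l e := by
  induction l with
  | nil => intro acc e; simp [goB]
  | cons i t ih => intro acc e; simpa [goB] using ih (acc ++ [(i * cs, e)]) (i * cs - 1)

-- goB on the descending index list [n-1, …, 0], in closed form (reversed map).
theorem goB_desc (cs : Int) : ∀ (n : Nat) (e : Int),
    goB cs ((List.range n).map (fun k : Nat => ((n : Int) - 1 - (k : Int)))) e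
      = ((List.range n).map
          (fun j : Nat => ((j : Int) * cs, if j = n - 1 then e else ((j : Int) + 1) * cs - 1))).reverse := by
  intro n
  induction n with
  | zero => intro e; simp [goB]
  | succ m ih =>
    intro e
    have hdesc : (List.range (m + 1)).map (fun k : Nat => (((m : Int) + 1) - 1 - (k : Int)))
        = ((m : Int)) :: (List.range m).map (fun k : Nat => ((m : Int) - 1 - (k : Int))) := by
      rw [List.range_succ_eq_map, List.map_cons, List.map_map]
      refine congrArg₂ _ (by ring) ?_
      apply List.map_congr_left
      intro k _
      simp [Function.comp]
      push_cast; ring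
    have hmap : (List.range m).map
          (fun j : Nat => ((j : Int) * cs, if j = m + 1 - 1 then e else ((j : Int) + 1) * cs - 1))
        = (List.range m).map
          (fun j : Nat => ((j : Int) * cs, if j = m - 1 then (m : Int) * cs - 1 else ((j : Int) + 1) * cs - 1)) := by
      apply List.map_congr_left
      intro j hj
      have hjm : j < m := List.mem_range.mp hj
      have h1 : j ≠ m + 1 - 1 := by omega
      by_cases h2 : j = m - 1
      · have h5 : (((m - 1 : Nat) : Int) + 1) = (m : Int) := by omega
        simp [h2, h5]
        intro hmm; exact absurd hmm (by omega)
      · have hm2 : j ≠ m := by omega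
        simp [h2, hm2]
    have hcast : ((m : Int) + 1) = ((m + 1 : Nat) : Int) := by push_cast; ring
    calc goB cs ((List.range (m + 1)).map (fun k : Nat => (((m + 1 : Nat) : Int) - 1 - (k : Int)))) e
        = ((m : Int) * cs, e) :: goB cs ((List.range m).map (fun k : Nat => ((m : Int) - 1 - (k : Int)))) ((m : Int) * cs - 1) := by
          rw [← hcast, hdesc]; rfl
      _ = _ := by
          rw [ih ((m : Int) * cs - 1), List.range_succ]
          simp only [List.map_append, List.reverse_append, List.map_cons, List.map_nil]
          have h5 : (m + 1 - 1 : Nat) = m := by omega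
          rw [hmap]
          simp [h5]

-- ===== VERDICT (by name: the statement is the Claim_ definition above) =====
theorem get_chunk_ranges_spec : Claim_equal_get_chunk_ranges := by
  intro tf nc _ _
  unfold Spec_get_chunk_ranges
  rw [getA_eq_map]
  show _ = (let cs := PySem.Int.floordiv tf nc;
    let st := (PySem.List.pyRange (nc - 1) (-1) (-1)).foldl
      (fun (p : List (Int × Int) × Int) i => (p.1 ++ [(i * cs, p.2)], i * cs - 1))
      ([], tf - 1);
    st.1.reverse)
  set cs := PySem.Int.floordiv tf nc with hcs
  simp only []
  rw [foldl_goB cs _ [] (tf - 1)]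
  rw [PySem.List.pyRange_neg_one]
  by_cases hle : nc ≤ 0
  · have h1 : (nc - 1 - (-1)).toNat = 0 := by omega
    rw [PySem.List.pyRange_one_eq_nil hle, h1]
    simp [goB]
  · have hpos : 0 < nc := by omega
    set n : Nat := nc.toNat with hn
    have hnnc : (n : Int) = nc := by omega
    have h1 : (nc - 1 - (-1)).toNat = n := by omega
    have hdescfun : (fun k : Nat => nc - 1 - (k : Int)) = (fun k : Nat => (n : Int) - 1 - (k : Int)) := by
      funext k; rw [hnnc]
    rw [h1, hdescfun, goB_desc cs n (tf - 1), List.nil_append, List.reverse_reverse,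
        PySem.List.pyRange_one 0 nc]
    have h2 : (nc - 0).toNat = n := by omega
    rw [h2, List.map_map]
    apply List.map_congr_left
    intro j hj
    have hjn : j < n := List.mem_range.mp hj
    simp only [Function.comp]
    rw [Prod.mk.injEq]
    constructor
    · ring
    · have hbeq : ((0 : Int) + j == nc - 1) = decide (j = n - 1) := by
        by_cases h : j = n - 1
        · have h4 : ((n - 1 : Nat) : Int) = nc - 1 := by omega
          simp [h, h4]
        · have h4 : (j : Int) ≠ nc - 1 := by omega
          simp [h, h4]
      rw [hbeq]
      by_cases h : j = n - 1
      · simp [h]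
      · simp [h]; ring
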